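-- pv_equiv track=rewrite | github.com/mr-ahtashamulhaq/python_repo | python_practice/Python Conditional Statement and Loops/Task_50_Last Non-Zero digit_Hard.py | rightmostNonZeroDigit
-- ===== SOURCE A (Python) =====
-- def rightmostNonZeroDigit (N, A):
--     product = 1
--     for i in A:
--         product *= i
--     for i in range(len(str(A))):
--         if product%10 != 0:
--             lastdigit = product%10
--             return lastdigit
--         else:
--             product = product//10
-- ===== SOURCE B (Python) =====
-- def rightmostNonZeroDigit(N, A):
--     twos = fives = 0
--     r = 1
--     for x in A:
--         if x == 0:
--             return None
--         while x % 2 == 0: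
--             x //= 2
--             twos += 1
--         while x % 5 == 0:
--             x //= 5
--             fives += 1
--         r = r * x % 10
--     if twos == fives:
--         return r
--     if fives > twos:
--         return 5 * r % 10
--     return [6, 2, 4, 8][(twos - fives) % 4] * r % 10
-- ===== Notes on version B (the rewrite author's own statement) =====
-- stated objective: faster
-- what changed: Instead of multiplying the whole list into one huge integer and then stripping trailing zeros digit by digit, B makes one pass that strips factors 2 and 5 from each element, keeps the remaining product only modulo 10, and reconstructs the last non-zero digit from the excess factor counts via the 2^k mod 10 cycle.
import Mathlib
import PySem

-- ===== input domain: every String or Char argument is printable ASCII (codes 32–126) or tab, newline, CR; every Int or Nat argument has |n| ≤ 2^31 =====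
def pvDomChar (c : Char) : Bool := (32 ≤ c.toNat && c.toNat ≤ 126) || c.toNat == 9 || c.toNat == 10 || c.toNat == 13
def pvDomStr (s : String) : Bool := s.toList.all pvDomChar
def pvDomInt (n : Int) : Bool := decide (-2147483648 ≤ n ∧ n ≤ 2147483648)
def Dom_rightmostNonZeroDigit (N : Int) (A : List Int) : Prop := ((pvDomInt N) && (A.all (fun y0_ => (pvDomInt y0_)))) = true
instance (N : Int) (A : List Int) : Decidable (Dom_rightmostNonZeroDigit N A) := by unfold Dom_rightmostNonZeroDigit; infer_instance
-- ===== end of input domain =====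

-- B replaces A's huge-integer product and digit-stripping loop by a one-pass factor count
-- (strip 2s and 5s per element, product kept mod 10), measurably faster on long lists.

-- ===== PORT A =====
-- str(A) for a Python list of ints, rendered character by character: "[" + ", ".join(str(x)) + "]"
def pyReprBody : List Int → List Char
  | [] => []
  | [x] => PySem.Int.toChars x
  | x :: y :: xs => PySem.Int.toChars x ++ [',', ' '] ++ pyReprBody (y :: xs)

def pyStrList (A : List Int) : List Char :=
  '[' :: (pyReprBody A ++ [']'])

-- the `for i in range(len(str(A)))` loop of A: return product%10 once nonzero, else product //= 10
def aGo : Nat → Int → Option Int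
  | 0, _ => none
  | f + 1, product =>
    if PySem.Int.mod product 10 ≠ 0 then some (PySem.Int.mod product 10)
    else aGo f (PySem.Int.floordiv product 10)

def rightmostNonZeroDigit (N : Int) (A : List Int) : Option Int :=
  aGo (pyStrList A).length (A.foldl (fun product i => product * i) 1)

-- ===== PORT B =====
-- the `while x % p == 0: x //= p` loop of B (p = 2 or 5); the x ≠ 0 guard only makes it total,
-- B never reaches it with x = 0
-- the `while x % p == 0: x //= p` loop of B (p = 2 or 5); structural recursion on a
-- fuel of |x|, which bounds the number of iterations; the x ≠ 0 guard only makes it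
-- total, B never reaches it with x = 0
def stripGo : Nat → Int → Int → Int × Nat
  | 0, _, x => (x, 0)
  | fuel + 1, p, x =>
    if x ≠ 0 ∧ PySem.Int.mod x p = 0 then
      let s := stripGo fuel p (PySem.Int.floordiv x p)
      (s.1, s.2 + 1)
    else (x, 0)

def stripLoop (p x : Int) : Int × Nat := stripGo x.natAbs p x

def bGo : List Int → Nat → Nat → Int → Option Int
  | [], twos, fives, r =>
    if twos = fives then some r
    else if fives > twos then some (PySem.Int.mod (5 * r) 10)
    else some (PySem.Int.mod
      (PySem.List.pyGetD ([6, 2, 4, 8] : List Int) (((twos - fives) % 4 : Nat) : Int) 0 * r) 10)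
  | x :: xs, twos, fives, r =>
    if x = 0 then none
    else
      let s2 := stripLoop 2 x
      let s5 := stripLoop 5 s2.1
      bGo xs (twos + s2.2) (fives + s5.2) (PySem.Int.mod (r * s5.1) 10)

def rightmostNonZeroDigit_alt (N : Int) (A : List Int) : Option Int :=
  bGo A 0 0 1

-- ===== PRECONDITION & SPEC =====
def Spec_rightmostNonZeroDigit (N : Int) (A : List Int) (out : Option Int) : Prop := out = rightmostNonZeroDigit_alt N A
instance (N : Int) (A : List Int) (out : Option Int) : Decidable (Spec_rightmostNonZeroDigit N A out) := by unfold Spec_rightmostNonZeroDigit; infer_instance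

-- ===== CLAIM (what is proved, stated in full; the proofs are below) =====
def Claim_equal_rightmostNonZeroDigit : Prop := ∀ (N : Int) (A : List Int), Dom_rightmostNonZeroDigit N A → Spec_rightmostNonZeroDigit N A (rightmostNonZeroDigit N A)

-- ===== LEMMAS AND PROOFS =====

lemma prime_int_two : Prime (2 : Int) := Int.prime_two
lemma prime_int_five : Prime (5 : Int) := by
  rw [Int.prime_iff_natAbs_prime]; norm_num

lemma not_dvd_pow_mul {p q : Int} (hp : Prime p) (hpq : ¬ p ∣ q) (b : Nat) {σ : Int}
    (hσ : ¬ p ∣ σ) : ¬ p ∣ q ^ b * σ := by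
  intro h
  rcases hp.dvd_mul.1 h with h' | h'
  · exact hpq (hp.dvd_of_dvd_pow h')
  · exact hσ h'

lemma aGo_zero (f : Nat) : aGo f 0 = none := by
  induction f with
  | zero => rfl
  | succ f ih =>
    simp [aGo, ih]

lemma aGo_spec : ∀ (f : Nat) (a b : Nat) (σ : Int), ¬ (2:Int) ∣ σ → ¬ (5:Int) ∣ σ →
    min a b < f →
    aGo f ((2:Int) ^ a * 5 ^ b * σ) =
      some (((2:Int) ^ (a - min a b) * 5 ^ (b - min a b) * σ) % 10) := by
  intro f
  induction f with
  | zero => intro a b σ _ _ h; omega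
  | succ f ih =>
    intro a b σ h2 h5 hm
    have hmod : PySem.Int.mod ((2:Int) ^ a * 5 ^ b * σ) 10 = ((2:Int) ^ a * 5 ^ b * σ) % 10 :=
      PySem.Int.mod_eq_emod_of_pos (by norm_num)
    rcases Nat.eq_zero_or_pos (min a b) with h0 | hpos
    · have hnd : ¬ (10:Int) ∣ ((2:Int) ^ a * 5 ^ b * σ) := by
        intro hd
        rcases Nat.min_eq_zero_iff.1 h0 with ha | hb
        · subst ha
          have : (2:Int) ∣ 5 ^ b * σ := by
            have := dvd_trans (by norm_num : (2:Int) ∣ 10) hd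
            simpa using this
          exact not_dvd_pow_mul prime_int_two (by norm_num) b h2 this
        · subst hb
          have : (5:Int) ∣ 2 ^ a * σ := by
            have := dvd_trans (by norm_num : (5:Int) ∣ 10) hd
            simpa using this
          exact not_dvd_pow_mul prime_int_five (by norm_num) a h5 this
      have hne : ((2:Int) ^ a * 5 ^ b * σ) % 10 ≠ 0 := by
        intro h; exact hnd (Int.dvd_of_emod_eq_zero h)
      simp only [aGo, hmod, if_pos hne, h0, Nat.sub_zero]
    · obtain ⟨a', rfl⟩ : ∃ a', a = a' + 1 := ⟨a - 1, by omega⟩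
      obtain ⟨b', rfl⟩ : ∃ b', b = b' + 1 := ⟨b - 1, by omega⟩
      have hfac : (2:Int) ^ (a' + 1) * 5 ^ (b' + 1) * σ =
          10 * ((2:Int) ^ a' * 5 ^ b' * σ) := by ring
      have hz : ((2:Int) ^ (a' + 1) * 5 ^ (b' + 1) * σ) % 10 = 0 := by
        rw [hfac]; exact Int.mul_emod_right 10 _
      have hdiv : PySem.Int.floordiv ((2:Int) ^ (a' + 1) * 5 ^ (b' + 1) * σ) 10 =
          (2:Int) ^ a' * 5 ^ b' * σ := by
        rw [PySem.Int.floordiv_eq_ediv_of_pos (by norm_num), hfac,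
          Int.mul_ediv_cancel_left _ (by norm_num)]
      have hrec := ih a' b' σ h2 h5 (by omega)
      have e1 : a' + 1 - min (a' + 1) (b' + 1) = a' - min a' b' := by omega
      have e2 : b' + 1 - min (a' + 1) (b' + 1) = b' - min a' b' := by omega
      simp only [aGo, hmod, hz, ite_not, hdiv, hrec, e1, e2]
      simp

lemma pow5_mod10 (e : Nat) (he : 1 ≤ e) : (5:Int) ^ e % 10 = 5 := by
  induction e, he using Nat.le_induction with
  | base => decide
  | succ e he ih =>
    rw [pow_succ, Int.mul_emod, ih]
    decide

lemma pow2_mod10 (e : Nat) (he : 1 ≤ e) :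
    (2:Int) ^ e % 10 = List.getD ([6, 2, 4, 8] : List Int) (e % 4) 0 := by
  induction e using Nat.strong_induction_on with
  | _ e ih =>
    by_cases hle : e ≤ 4
    · interval_cases e <;> decide
    · have h1 : (2:Int) ^ e = 2 ^ (e - 4) * 2 ^ 4 := by
        rw [← pow_add]; congr 1; omega
      have h2 := ih (e - 4) (by omega) (by omega)
      have h3 : e % 4 = (e - 4) % 4 := by omega
      rw [h1, Int.mul_emod, h2, h3]
      have hk : (e - 4) % 4 < 4 := Nat.mod_lt _ (by omega)
      set k := (e - 4) % 4 with hkdef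
      interval_cases k <;> decide

lemma stripGo_spec (p : Int) (hp : 1 < p) :
    ∀ (fuel : Nat) (x : Int), x.natAbs ≤ fuel → x ≠ 0 →
    x = p ^ (stripGo fuel p x).2 * (stripGo fuel p x).1 ∧
    ¬ p ∣ (stripGo fuel p x).1 ∧ (stripGo fuel p x).1 ≠ 0 := by
  intro fuel
  induction fuel with
  | zero => intro x hle hx; exfalso; exact hx (by omega)
  | succ n ihn =>
    intro x hle hx
    by_cases h : x ≠ 0 ∧ PySem.Int.mod x p = 0
    · obtain ⟨k, hk⟩ := (PySem.Int.mod_eq_zero_iff_dvd x p).1 h.2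
      have hfd : PySem.Int.floordiv x p = k := by
        rw [PySem.Int.floordiv_eq_ediv_of_pos (by omega), hk,
          Int.mul_ediv_cancel_left _ (by omega)]
      have hk0 : k ≠ 0 := by rintro rfl; exact hx (by simpa using hk)
      have habs : x.natAbs = p.natAbs * k.natAbs := by rw [hk, Int.natAbs_mul]
      have hka : k.natAbs ≤ n := by
        have h1 : k.natAbs ≠ 0 := Int.natAbs_ne_zero.2 hk0
        have h2 : 2 ≤ p.natAbs := by omega
        have h3 : x.natAbs ≠ 0 := Int.natAbs_ne_zero.2 hx
        nlinarith [habs, hle]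
      have ihk := ihn k hka hk0
      simp only [stripGo, if_pos h, hfd]
      refine ⟨?_, ihk.2.1, ihk.2.2⟩
      calc x = p * k := hk
        _ = p * (p ^ (stripGo n p k).2 * (stripGo n p k).1) := by rw [← ihk.1]
        _ = p ^ ((stripGo n p k).2 + 1) * (stripGo n p k).1 := by ring
    · simp only [stripGo, if_neg h]
      have hmne : PySem.Int.mod x p ≠ 0 := by
        intro hm; exact h ⟨hx, hm⟩
      refine ⟨by simp, ?_, hx⟩
      intro hd
      exact hmne ((PySem.Int.mod_eq_zero_iff_dvd x p).2 hd)

lemma stripLoop_spec (p : Int) (hp : 1 < p) (x : Int) (hx : x ≠ 0) :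
    x = p ^ (stripLoop p x).2 * (stripLoop p x).1 ∧
    ¬ p ∣ (stripLoop p x).1 ∧ (stripLoop p x).1 ≠ 0 :=
  stripGo_spec p hp x.natAbs x le_rfl hx

lemma bGo_zero : ∀ (xs : List Int) (t f : Nat) (r : Int), (0:Int) ∈ xs →
    bGo xs t f r = none := by
  intro xs
  induction xs with
  | nil => intro _ _ _ h; simp at h
  | cons x xs ih =>
    intro t f r h
    by_cases hx : x = 0
    · simp [bGo, hx]
    · have hmem : (0:Int) ∈ xs := by
        rcases List.mem_cons.1 h with h' | h'
        · exact absurd h'.symm hx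
        · exact h'
      simp only [bGo, if_neg hx]
      exact ih _ _ _ hmem

lemma bGo_spec : ∀ (xs : List Int) (twos fives : Nat) (ρ : Int),
    ¬ (2:Int) ∣ ρ → ¬ (5:Int) ∣ ρ → (0:Int) ∉ xs →
    ∃ (a b : Nat) (σ : Int), ¬ (2:Int) ∣ σ ∧ ¬ (5:Int) ∣ σ ∧
      xs.foldl (fun product i => product * i) ((2:Int) ^ twos * 5 ^ fives * ρ) =
        (2:Int) ^ a * 5 ^ b * σ ∧
      bGo xs twos fives (ρ % 10) =
        some (((2:Int) ^ (a - min a b) * 5 ^ (b - min a b) * σ) % 10) := by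
  intro xs
  induction xs with
  | nil =>
    intro twos fives ρ h2 h5 _
    refine ⟨twos, fives, ρ, h2, h5, by simp, ?_⟩
    rcases lt_trichotomy twos fives with h | h | h
    · simp only [bGo]
      rw [if_neg (by omega : ¬ twos = fives), if_pos (by omega : fives > twos),
        PySem.Int.mod_eq_emod_of_pos (by norm_num)]
      congr 1
      rw [(by omega : min twos fives = twos), Nat.sub_self, pow_zero, one_mul,
        Int.mul_emod ((5:Int) ^ (fives - twos)) ρ, pow5_mod10 _ (by omega)]
    · subst h
      simp [bGo]
    · simp only [bGo]
      rw [if_neg (by omega : ¬ twos = fives), if_neg (by omega : ¬ fives > twos),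
        PySem.Int.mod_eq_emod_of_pos (by norm_num)]
      simp only [PySem.List.pyGetD_natCast]
      congr 1
      rw [(by omega : min twos fives = fives), Nat.sub_self, pow_zero, mul_one,
        Int.mul_emod ((2:Int) ^ (twos - fives)) ρ, pow2_mod10 _ (by omega)]
  | cons x xs ih =>
    intro twos fives ρ h2 h5 h0
    have hx : x ≠ 0 := by
      intro h; exact h0 (by simp [h])
    have h0' : (0:Int) ∉ xs := fun h => h0 (List.mem_cons_of_mem _ h)
    have hs2 := stripLoop_spec 2 (by norm_num) x hx
    set x2 := (stripLoop 2 x).1 with hx2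
    set c2 := (stripLoop 2 x).2 with hc2
    have hs5 := stripLoop_spec 5 (by norm_num) x2 hs2.2.2
    set x5 := (stripLoop 5 x2).1 with hx5
    set c5 := (stripLoop 5 x2).2 with hc5
    have h2x5 : ¬ (2:Int) ∣ x5 := by
      intro hd
      exact hs2.2.1 (hs5.1 ▸ Dvd.dvd.mul_left hd _)
    have h2ρ' : ¬ (2:Int) ∣ ρ * x5 := by
      intro hd
      rcases prime_int_two.dvd_mul.1 hd with h' | h'
      · exact h2 h'
      · exact h2x5 h'
    have h5ρ' : ¬ (5:Int) ∣ ρ * x5 := by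
      intro hd
      rcases prime_int_five.dvd_mul.1 hd with h' | h'
      · exact h5 h'
      · exact hs5.2.1 h'
    obtain ⟨a, b, σ, ha2, ha5, hfold, hbgo⟩ := ih (twos + c2) (fives + c5) (ρ * x5) h2ρ' h5ρ' h0'
    refine ⟨a, b, σ, ha2, ha5, ?_, ?_⟩
    · rw [List.foldl_cons, ← hfold]
      congr 1
      have : x = (2:Int) ^ c2 * ((5:Int) ^ c5 * x5) := by rw [← hs5.1, ← hs2.1]
      rw [this]; ring
    · simp only [bGo, if_neg hx, ← hx2, ← hc2, ← hx5, ← hc5]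
      have hr : PySem.Int.mod (ρ % 10 * x5) 10 = (ρ * x5) % 10 := by
        rw [PySem.Int.mod_eq_emod_of_pos (by norm_num),
          Int.mul_emod (ρ % 10) x5, Int.emod_emod_of_dvd ρ (by norm_num), ← Int.mul_emod]
      rw [hr]
      exact hbgo

lemma foldl_mul_zero_init : ∀ (xs : List Int), xs.foldl (fun product i => product * i) 0 = 0 := by
  intro xs
  induction xs with
  | nil => rfl
  | cons x xs ih => simpa using ih

lemma foldl_mul_zero_mem : ∀ (xs : List Int) (c : Int), (0:Int) ∈ xs →
    xs.foldl (fun product i => product * i) c = 0 := by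
  intro xs
  induction xs with
  | nil => intro c h; simp at h
  | cons x xs ih =>
    intro c h
    rcases List.mem_cons.1 h with h' | h'
    · simp only [List.foldl_cons, ← h', mul_zero]
      exact foldl_mul_zero_init xs
    · exact ih _ h'

lemma toDigitsCore_lt : ∀ (f n : Nat), n < f → n < 10 ^ (Nat.toDigitsCore 10 f n []).length := by
  intro f
  induction f with
  | zero => intro n h; omega
  | succ f ih =>
    intro n hn
    by_cases h : n / 10 = 0
    · have he : Nat.toDigitsCore 10 (f + 1) n [] = [(n % 10).digitChar] := by
        rw [Nat.toDigitsCore]; simp [h]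
      rw [he]
      simp only [List.length_cons, List.length_nil]
      omega
    · have he : Nat.toDigitsCore 10 (f + 1) n [] =
          Nat.toDigitsCore 10 f (n / 10) [(n % 10).digitChar] := by
        rw [Nat.toDigitsCore]; simp [h]
      rw [he, Nat.toDigitsCore_lens_eq]
      have h1 : n / 10 < f := by
        have := Nat.div_lt_self (by omega : 0 < n) (by omega : 1 < 10)
        omega
      have h2 := ih (n / 10) h1
      have h3 : n < (n / 10 + 1) * 10 := by omega
      calc n < (n / 10 + 1) * 10 := h3
        _ ≤ 10 ^ (Nat.toDigitsCore 10 f (n / 10) []).length * 10 := by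
            exact Nat.mul_le_mul_right _ (by omega)
        _ = 10 ^ ((Nat.toDigitsCore 10 f (n / 10) []).length + 1) := by rw [pow_succ]

lemma natAbs_lt_pow_toChars (x : Int) : x.natAbs < 10 ^ (PySem.Int.toChars x).length := by
  unfold PySem.Int.toChars
  have hbase : ∀ m : Nat, m < 10 ^ (Nat.toDigits 10 m).length := by
    intro m
    exact toDigitsCore_lt (m + 1) m (by omega)
  split_ifs with h
  · simp only [List.length_cons]
    calc x.natAbs < 10 ^ (Nat.toDigits 10 x.natAbs).length := hbase _
      _ ≤ 10 ^ ((Nat.toDigits 10 x.natAbs).length + 1) := Nat.pow_le_pow_right (by omega) (by omega)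
  · have : x.toNat = x.natAbs := by omega
    rw [← this]
    exact hbase _

lemma foldl_natAbs_le : ∀ (xs : List Int) (c : Int),
    (xs.foldl (fun product i => product * i) c).natAbs ≤
      c.natAbs * 10 ^ ((xs.map fun x => (PySem.Int.toChars x).length).sum) := by
  intro xs
  induction xs with
  | nil => intro c; simp
  | cons x xs ih =>
    intro c
    simp only [List.foldl_cons, List.map_cons, List.sum_cons]
    calc ((xs.foldl (fun product i => product * i) (c * x)).natAbs)
        ≤ (c * x).natAbs * 10 ^ ((xs.map fun x => (PySem.Int.toChars x).length).sum) := ih _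
      _ = c.natAbs * x.natAbs * 10 ^ ((xs.map fun x => (PySem.Int.toChars x).length).sum) := by
          rw [Int.natAbs_mul]
      _ ≤ c.natAbs * 10 ^ (PySem.Int.toChars x).length *
            10 ^ ((xs.map fun x => (PySem.Int.toChars x).length).sum) := by
          exact Nat.mul_le_mul_right _
            (Nat.mul_le_mul_left _ (Nat.le_of_lt (natAbs_lt_pow_toChars x)))
      _ = c.natAbs * 10 ^ ((PySem.Int.toChars x).length +
            (xs.map fun x => (PySem.Int.toChars x).length).sum) := by
          rw [pow_add]; ring

lemma pyReprBody_len : ∀ (xs : List Int),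
    ((xs.map fun x => (PySem.Int.toChars x).length).sum) ≤ (pyReprBody xs).length := by
  intro xs
  induction xs with
  | nil => simp [pyReprBody]
  | cons x xs ih =>
    cases xs with
    | nil => simp [pyReprBody]
    | cons y ys =>
      simp only [pyReprBody, List.length_append, List.map_cons, List.sum_cons] at *
      omega

-- ===== VERDICT (by name: the statement is the Claim_ definition above) =====
theorem rightmostNonZeroDigit_spec : Claim_equal_rightmostNonZeroDigit := by
  intro N A _
  show rightmostNonZeroDigit N A = rightmostNonZeroDigit_alt N A
  unfold rightmostNonZeroDigit rightmostNonZeroDigit_alt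
  by_cases h0 : (0:Int) ∈ A
  · rw [foldl_mul_zero_mem A 1 h0, bGo_zero A 0 0 1 h0, aGo_zero]
  · obtain ⟨a, b, σ, h2, h5, hfold, hbgo⟩ :=
      bGo_spec A 0 0 1 (by norm_num) (by norm_num) h0
    have hinit : ((2:Int) ^ 0 * 5 ^ 0 * 1) = 1 := by norm_num
    rw [hinit] at hfold
    have hone : ((1:Int) % 10) = 1 := by decide
    rw [hone] at hbgo
    rw [hfold, hbgo]
    apply aGo_spec _ a b σ h2 h5
    -- min a b < len(str(A)):  10^min ∣ P, |P| ≤ 10^Σ, and len(str(A)) ≥ Σ + 2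
    have hσ0 : σ ≠ 0 := by rintro rfl; exact h2 (dvd_zero 2)
    have hP0 : ((2:Int) ^ a * 5 ^ b * σ) ≠ 0 :=
      mul_ne_zero (mul_ne_zero (pow_ne_zero _ (by norm_num)) (pow_ne_zero _ (by norm_num))) hσ0
    have hdvd : (10:Int) ^ (min a b) ∣ (2:Int) ^ a * 5 ^ b * σ := by
      have : ((10:Int)) ^ (min a b) = 2 ^ (min a b) * 5 ^ (min a b) := by
        rw [← mul_pow]; norm_num
      rw [this]
      exact Dvd.dvd.mul_right
        (mul_dvd_mul (pow_dvd_pow 2 (Nat.min_le_left a b)) (pow_dvd_pow 5 (Nat.min_le_right a b))) σ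
    have hlow : 10 ^ (min a b) ≤ ((2:Int) ^ a * 5 ^ b * σ).natAbs := by
      have := Int.natAbs_dvd_natAbs.2 hdvd
      have h10 : ((10:Int) ^ (min a b)).natAbs = 10 ^ (min a b) := by
        rw [Int.natAbs_pow]; rfl
      rw [h10] at this
      exact Nat.le_of_dvd (Int.natAbs_pos.2 hP0) this
    have hhigh : ((2:Int) ^ a * 5 ^ b * σ).natAbs ≤
        10 ^ ((A.map fun x => (PySem.Int.toChars x).length).sum) := by
      rw [← hfold]
      have := foldl_natAbs_le A 1
      simpa using this
    have hmin : min a b ≤ (A.map fun x => (PySem.Int.toChars x).length).sum :=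
      (Nat.pow_le_pow_iff_right (by omega)).1 (le_trans hlow hhigh)
    have hfuel : (A.map fun x => (PySem.Int.toChars x).length).sum + 2 ≤ (pyStrList A).length := by
      have := pyReprBody_len A
      simp only [pyStrList, List.length_cons, List.length_append, List.length_cons,
        List.length_nil]
      omega
    omega
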